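-- pv_equiv track=rewrite | github.com/Omewah/alx-interview | 0x0A-primegame/0-prime_game.py | isWinner
-- ===== SOURCE A (Python) =====
-- def check_prime(n):
--     """will check if n is a prime number """
--     for i in range(2, int(n ** 0.5) + 1):
--         if not n % i:
--             return False
--     return True
--
-- def add_prime(n, primes):
--     """this will Add the prime n to list"""
--     addprime = primes[-1]
--     if n > addprime:
--         for i in range(addprime + 1, n + 1):
--             if check_prime(i):
--                 primes.append(i)
--             else:
--                 primes.append(0)
--
-- def isWinner(x, nums):
--     """Returns the name of the player with the most wins"""
--
--     score = {"Maria": 0, "Ben": 0}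
--     primes = [0, 0, 2]
--     add_prime(max(nums), primes)
--
--     for round in range(x):
--         roundsum = sum((i != 0 and i <= nums[round])
--                        for i in primes[:nums[round] + 1])
--         if (roundsum % 2):
--             winner = "Maria"
--         else:
--             winner = "Ben"
--         if winner:
--             score[winner] += 1
--
--     if score["Maria"] > score["Ben"]:
--         return "Maria"
--     elif score["Ben"] > score["Maria"]:
--         return "Ben"
--
--     return None
-- ===== SOURCE B (Python) =====
-- def _is_prime(n):
--     """trial division with d*d <= n (no float sqrt)"""
--     if n < 2:
--         return False
--     d = 2
--     while d * d <= n: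
--         if n % d == 0:
--             return False
--         d += 1
--     return True
--
--
-- def isWinner(x, nums):
--     """Prefix table of prime counts, then O(1) per round."""
--     if not nums or x < 1:
--         return None
--     rounds = nums[:x]
--     limit = max(max(rounds), 1)
--     pi = [0] * (limit + 1)
--     c = 0
--     for i in range(limit + 1):
--         if _is_prime(i):
--             c += 1
--         pi[i] = c
--     maria = sum(1 for n in rounds if n >= 2 and pi[n] % 2 == 1)
--     ben = len(rounds) - maria
--     if maria > ben:
--         return "Maria"
--     if ben > maria:
--         return "Ben"
--     return None
-- ===== Notes on version B (the rewrite author's own statement) =====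
-- stated objective: faster
-- what changed: B builds a prefix table of prime counts once (trial division with d*d<=n, no float sqrt) and decides each round by one O(1) parity lookup over nums[:x], instead of A's per-round O(n) sum over a slice of a primes-or-zero placeholder list.
import Mathlib
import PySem

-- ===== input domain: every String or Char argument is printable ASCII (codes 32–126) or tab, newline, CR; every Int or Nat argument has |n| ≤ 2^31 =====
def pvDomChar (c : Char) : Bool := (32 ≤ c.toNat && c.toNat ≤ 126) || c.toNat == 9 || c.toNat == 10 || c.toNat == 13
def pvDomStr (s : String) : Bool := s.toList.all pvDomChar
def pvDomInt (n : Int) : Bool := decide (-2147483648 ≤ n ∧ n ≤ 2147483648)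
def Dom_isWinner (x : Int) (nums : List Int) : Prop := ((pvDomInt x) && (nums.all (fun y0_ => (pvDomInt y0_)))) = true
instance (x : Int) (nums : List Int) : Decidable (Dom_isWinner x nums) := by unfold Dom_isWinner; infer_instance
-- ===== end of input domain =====

-- B replaces A's per-round slice-and-sum over a primes/zero placeholder list by a prefix table of
-- prime counts with one O(1) parity lookup per round (measured faster; A mutates no caller-visible state).


-- ===== PORT A =====
-- check_prime: Python's int(n ** 0.5) is ported as Nat.sqrt n.toNat, exact for the 0 ≤ n ≤ 2^31
-- values it is called on here; the for-loop returning False on the first divisor is List.all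
def checkPrime (n : Int) : Bool :=
  (PySem.List.pyRange 2 ((Nat.sqrt n.toNat : Int) + 1) 1).all (fun i => !(PySem.Int.mod n i == 0))


-- add_prime mutates `primes` in place in Python; ported as returning the extended list
def addPrime (n : Int) (primes : List Int) : List Int :=
  match PySem.List.pyGet? primes (-1) with
  | none => primes
  | some addprime =>
    if n > addprime then
      (PySem.List.pyRange (addprime + 1) (n + 1) 1).foldl
        (fun ps i => ps ++ [if checkPrime i then i else 0]) primes
    else primes


-- the score dict has the two fixed keys "Maria"/"Ben": ported as a pair (score_Maria, score_Ben);
-- the Option state is none exactly where Python raises (nums[round] IndexError); `if winner:` is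
-- always true (nonempty string), so score[winner] += 1 is the inner if
def isWinner (x : Int) (nums : List Int) : Option String :=
  match PySem.List.max? nums (fun y => y) with
  | none => none
  | some m =>
    let primes := addPrime m [0, 0, 2]
    let score := (PySem.List.pyRange 0 x 1).foldl
      (fun (st : Option (Int × Int)) r =>
        match st, PySem.List.pyGet? nums r with
        | some (ms, bs), some nr =>
          let roundsum := (PySem.List.slice primes none (some (nr + 1))).foldl
            (fun acc i => acc + (if i ≠ 0 ∧ i ≤ nr then (1 : Int) else 0)) 0
          let winner := if PySem.Int.mod roundsum 2 ≠ 0 then "Maria" else "Ben"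
          if winner = "Maria" then some (ms + 1, bs) else some (ms, bs + 1)
        | _, _ => none)
      (some (0, 0))
    match score with
    | none => none
    | some (ms, bs) =>
      if ms > bs then some "Maria" else if bs > ms then some "Ben" else none

-- ===== PORT B =====
-- _is_prime's while loop: d runs from 2 while d * d ≤ n
def tdLoop (n d : Int) : Bool :=
  if d * d ≤ n then
    (if PySem.Int.mod n d == 0 then false else tdLoop n (d + 1))
  else true
termination_by (n + 1 - d).toNat
decreasing_by
  have hd : d ≤ n := by nlinarith [sq_nonneg (d - 1)]
  omega
def isPrimeB (n : Int) : Bool := if n < 2 then false else tdLoop n 2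





-- pi = [0]*(limit+1) assigned in index order is ported as appending; the pi[n] lookup is pyGetD
-- (always in range here: 2 ≤ n ≤ limit)
def isWinner_alt (x : Int) (nums : List Int) : Option String :=
  if nums = [] ∨ x < 1 then none
  else
    let rounds := PySem.List.slice nums none (some x)
    match PySem.List.max? rounds (fun y => y) with
    | none => none
    | some mx =>
      let limit := max mx 1
      let pc := (PySem.List.pyRange 0 (limit + 1) 1).foldl
        (fun (st : List Int × Int) i =>
          let c := if isPrimeB i then st.2 + 1 else st.2
          (st.1 ++ [c], c)) ([], 0)
      let pi := pc.1
      let maria := rounds.foldl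
        (fun (acc : Int) n =>
          if 2 ≤ n ∧ PySem.Int.mod (PySem.List.pyGetD pi n 0) 2 = 1 then acc + 1 else acc) 0
      let ben := (rounds.length : Int) - maria
      if maria > ben then some "Maria" else if ben > maria then some "Ben" else none

-- ===== PRECONDITION & SPEC =====
-- Pre_ excludes exactly the inputs where A raises: empty nums (ValueError from max) and
-- x > len(nums) (IndexError from nums[round])
def Pre_isWinner (x : Int) (nums : List Int) : Prop := nums ≠ [] ∧ x ≤ (nums.length : Int)
instance (x : Int) (nums : List Int) : Decidable (Pre_isWinner x nums) := by unfold Pre_isWinner; infer_instance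
def pvWitness_isWinner : Int × List Int := (2, [4, 5])

def Spec_isWinner (x : Int) (nums : List Int) (out : Option String) : Prop := out = isWinner_alt x nums
instance (x : Int) (nums : List Int) (out : Option String) : Decidable (Spec_isWinner x nums out) := by unfold Spec_isWinner; infer_instance

-- ===== CLAIM (what is proved, stated in full; the proofs are below) =====
def Claim_equal_isWinner : Prop := ∀ (x : Int) (nums : List Int), Dom_isWinner x nums → Pre_isWinner x nums → Spec_isWinner x nums (isWinner x nums)

-- ===== LEMMAS AND PROOFS =====

theorem tdLoop_iff (n d : Int) : 1 ≤ d →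
    (tdLoop n d = true ↔ ∀ e : Int, d ≤ e → e * e ≤ n → PySem.Int.mod n e ≠ 0) := by
  fun_induction tdLoop n d with
  | case1 d h1 h2 =>
    intro hd
    simp only [Bool.false_eq_true, false_iff]
    intro H
    exact H d le_rfl h1 (by simpa using h2)
  | case2 d h1 h2 ih =>
    intro hd
    rw [ih (by omega)]
    constructor
    · intro H e hde hee
      rcases eq_or_lt_of_le hde with rfl | hlt
      · simpa using h2
      · exact H e (by omega) hee
    · intro H e hde hee; exact H e (by omega) hee
  | case3 d h1 =>
    intro hd
    simp only [true_iff]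
    intro e hde hee
    exfalso
    rw [not_le] at h1
    nlinarith

theorem isPrimeB_ge_two {n : Int} (h : isPrimeB n = true) : 2 ≤ n := by
  by_contra hc
  simp [isPrimeB] at h
  omega



theorem sq_le_iff_lt_sqrt (n e : Int) (he : 0 ≤ e) (hn : 0 ≤ n) :
    e * e ≤ n ↔ e < (Nat.sqrt n.toNat : Int) + 1 := by
  rw [Int.lt_add_one_iff]
  obtain ⟨et, rfl⟩ : ∃ t : Nat, e = (t : Int) := ⟨e.toNat, (Int.toNat_of_nonneg he).symm⟩
  obtain ⟨nt, rfl⟩ : ∃ t : Nat, n = (t : Int) := ⟨n.toNat, (Int.toNat_of_nonneg hn).symm⟩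
  norm_cast
  exact (Nat.le_sqrt).symm

theorem checkPrime_eq (n : Int) (hn : 2 ≤ n) : checkPrime n = isPrimeB n := by
  have key : checkPrime n = true ↔ isPrimeB n = true := by
    rw [checkPrime, isPrimeB, if_neg (by omega : ¬ n < 2), tdLoop_iff n 2 (by omega),
        List.all_eq_true]
    constructor
    · intro H e he2 hee
      have hmem : e ∈ PySem.List.pyRange 2 ((Nat.sqrt n.toNat : Int) + 1) 1 := by
        rw [PySem.List.mem_pyRange_one]
        exact ⟨he2, (sq_le_iff_lt_sqrt n e (by omega) (by omega)).mp hee⟩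
      simpa using H e hmem
    · intro H i hi
      rw [PySem.List.mem_pyRange_one] at hi
      have := H i hi.1 ((sq_le_iff_lt_sqrt n i (by omega) (by omega)).mpr hi.2)
      simpa using this
  cases hb : isPrimeB n with
  | true => exact key.mpr hb
  | false =>
    cases hc : checkPrime n with
    | false => rfl
    | true => rw [key.mp hc] at hb; cases hb

def ent (j : Int) : Int := if isPrimeB j then j else 0

theorem isPrimeB_zero : isPrimeB 0 = false := by simp [isPrimeB]
theorem isPrimeB_one : isPrimeB 1 = false := by simp [isPrimeB]
theorem isPrimeB_two : isPrimeB 2 = true := by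
  rw [isPrimeB, if_neg (by norm_num), tdLoop]
  norm_num

theorem map_ent_range3 : (PySem.List.pyRange 0 3 1).map ent = [0, 0, 2] := by
  rw [show PySem.List.pyRange 0 3 1 = [0, 1, 2] from by decide]
  simp [ent, isPrimeB_zero, isPrimeB_one, isPrimeB_two]

theorem addPrime_eq (m : Int) :
    addPrime m [0, 0, 2] = (PySem.List.pyRange 0 (max m 2 + 1) 1).map ent := by
  have hget : PySem.List.pyGet? ([0, 0, 2] : List Int) (-1) = some 2 := by decide
  rw [addPrime, hget]
  dsimp only
  by_cases hm : m > 2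
  · rw [if_pos hm]
    rw [PySem.List.foldl_append_singleton_eq_map]
    have hsplit : PySem.List.pyRange 0 (max m 2 + 1) 1
        = PySem.List.pyRange 0 3 1 ++ PySem.List.pyRange 3 (max m 2 + 1) 1 :=
      PySem.List.pyRange_one_append 0 3 (max m 2 + 1) (by omega) (by omega)
    rw [hsplit, List.map_append]
    have h1 := map_ent_range3
    have h2 : (PySem.List.pyRange (2 + 1) (m + 1) 1).map (fun i => if checkPrime i then i else 0)
        = (PySem.List.pyRange 3 (max m 2 + 1) 1).map ent := by
      have : (3 : Int) = 2 + 1 := by norm_num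
      rw [show max m 2 + 1 = m + 1 by omega, ← this]
      refine List.map_congr_left ?_
      intro j hj
      rw [PySem.List.mem_pyRange_one] at hj
      rw [ent, checkPrime_eq j (by omega)]
    rw [h1, h2]
  · rw [if_neg hm, show max m 2 = 2 by omega]
    exact map_ent_range3.symm

def piCnt (n : Int) : Int := ((PySem.List.pyRange 0 (n + 1) 1).countP isPrimeB : Int)

theorem ent_nonneg (j : Int) : 0 ≤ ent j := by
  rw [ent]
  split_ifs with h
  · have := isPrimeB_ge_two h; omega
  · omega

theorem roundsum_eq (m nr : Int) (hle : nr ≤ m) :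
    (PySem.List.slice (addPrime m [0, 0, 2]) none (some (nr + 1))).foldl
        (fun acc i => acc + (if i ≠ 0 ∧ i ≤ nr then (1 : Int) else 0)) 0 = piCnt nr := by
  rw [addPrime_eq]
  by_cases hnr : nr < 0
  · have hz : piCnt nr = 0 := by
      rw [piCnt, PySem.List.pyRange_one_eq_nil (by omega), List.countP_nil]; rfl
    rw [hz]
    rw [PySem.List.foldl_congr_mem _ _ (fun acc _ => acc) 0 ?_, PySem.List.foldl_ignore]
    intro acc i hi
    have hi' := PySem.List.mem_of_mem_slice _ _ _ hi
    obtain ⟨j, _, rfl⟩ := List.mem_map.mp hi'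
    have := ent_nonneg j
    simp only [if_neg (show ¬(ent j ≠ 0 ∧ ent j ≤ nr) by omega), add_zero]
  · have h0 : (0 : Int) ≤ nr + 1 := by omega
    rw [PySem.List.slice_to _ h0, ← List.map_take]
    have hsplit : PySem.List.pyRange 0 (max m 2 + 1) 1
        = PySem.List.pyRange 0 (nr + 1) 1 ++ PySem.List.pyRange (nr + 1) (max m 2 + 1) 1 :=
      PySem.List.pyRange_one_append 0 (nr + 1) (max m 2 + 1) (by omega) (by omega)
    rw [hsplit, List.take_left' (by rw [PySem.List.length_pyRange_one]; omega)]
    rw [PySem.List.foldl_add _ (fun i => if i ≠ 0 ∧ i ≤ nr then (1 : Int) else 0) 0]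
    rw [List.map_map]
    have hcnt : (List.map ((fun i => if i ≠ 0 ∧ i ≤ nr then (1 : Int) else 0) ∘ ent)
        (PySem.List.pyRange 0 (nr + 1) 1)).sum
        = (((PySem.List.pyRange 0 (nr + 1) 1).countP
            (fun j => decide (ent j ≠ 0 ∧ ent j ≤ nr)) : Nat) : Int) := by
      rw [← PySem.List.sum_map_ite_one_zero (fun j => decide (ent j ≠ 0 ∧ ent j ≤ nr))]
      refine congrArg List.sum (List.map_congr_left ?_)
      intro j _
      simp only [Function.comp_apply, decide_eq_true_eq]
    rw [hcnt, piCnt, zero_add]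
    refine congrArg _ (List.countP_congr ?_)
    intro j hj
    rw [PySem.List.mem_pyRange_one] at hj
    simp only [decide_eq_true_eq]
    constructor
    · intro ⟨h1, _⟩
      rw [ent] at h1
      by_cases hp : isPrimeB j
      · exact hp
      · simp [hp] at h1
    · intro hp
      rw [ent, if_pos hp]
      have := isPrimeB_ge_two hp
      omega

theorem piCnt_succ (k : Int) (hk : 0 ≤ k) :
    piCnt k = piCnt (k - 1) + (if isPrimeB k then 1 else 0) := by
  rw [piCnt, piCnt, show k - 1 + 1 = k by ring,
      PySem.List.pyRange_one_succ_right hk, List.countP_append]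
  simp only [List.countP_cons, List.countP_nil]
  by_cases hp : isPrimeB k
  · simp [hp]
  · simp [hp]

theorem piCnt_lt_two (n : Int) (hn : n < 2) : piCnt n = 0 := by
  rw [piCnt]
  norm_cast
  rw [List.countP_eq_zero]
  intro j hj
  rw [PySem.List.mem_pyRange_one] at hj
  rw [isPrimeB, if_pos (by omega)]
  simp

theorem pc_fold (k : Nat) :
    (PySem.List.pyRange 0 (k : Int) 1).foldl
        (fun (st : List Int × Int) i =>
          let c := if isPrimeB i then st.2 + 1 else st.2
          (st.1 ++ [c], c)) ([], 0)
      = ((PySem.List.pyRange 0 (k : Int) 1).map piCnt, piCnt ((k : Int) - 1)) := by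
  induction k with
  | zero =>
    simp only [Nat.cast_zero, PySem.List.pyRange_one_eq_nil (le_refl 0), List.foldl_nil,
      List.map_nil]
    rw [piCnt_lt_two (0 - 1) (by omega)]
  | succ k ih =>
    rw [show ((k + 1 : Nat) : Int) = (k : Int) + 1 by push_cast; ring,
        PySem.List.pyRange_one_succ_right (show (0:Int) ≤ (k:Int) by positivity),
        List.foldl_append, ih, List.map_append]
    simp only [List.foldl_cons, List.foldl_nil, List.map_cons, List.map_nil]
    have hc : (if isPrimeB (k : Int) then piCnt ((k : Int) - 1) + 1 else piCnt ((k : Int) - 1))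
        = piCnt (k : Int) := by
      rw [piCnt_succ (k : Int) (by positivity)]
      by_cases hp : isPrimeB (k : Int) <;> simp [hp]
    rw [show ((k : Int) + 1 - 1) = (k : Int) by ring]
    simp only [hc]

theorem scoreA_fold (nums : List Int) (m : Int) (hmax : ∀ y ∈ nums, y ≤ m) (k : Nat)
    (hk : k ≤ nums.length) :
    (PySem.List.pyRange 0 (k : Int) 1).foldl
      (fun (st : Option (Int × Int)) r =>
        match st, PySem.List.pyGet? nums r with
        | some (ms, bs), some nr =>
          let roundsum := (PySem.List.slice (addPrime m [0, 0, 2]) none (some (nr + 1))).foldl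
            (fun acc i => acc + (if i ≠ 0 ∧ i ≤ nr then (1 : Int) else 0)) 0
          let winner := if PySem.Int.mod roundsum 2 ≠ 0 then "Maria" else "Ben"
          if winner = "Maria" then some (ms + 1, bs) else some (ms, bs + 1)
        | _, _ => none)
      (some (0, 0))
    = some ((((nums.take k).countP (fun nr => decide (PySem.Int.mod (piCnt nr) 2 ≠ 0)) : Nat) : Int),
            (k : Int) - (((nums.take k).countP (fun nr => decide (PySem.Int.mod (piCnt nr) 2 ≠ 0)) : Nat) : Int)) := by
  induction k with
  | zero => simp [PySem.List.pyRange_one_eq_nil (le_refl 0)]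
  | succ k ih =>
    have hklt : k < nums.length := by omega
    rw [show ((k + 1 : Nat) : Int) = (k : Int) + 1 by push_cast; ring,
        PySem.List.pyRange_one_succ_right (show (0:Int) ≤ (k:Int) by positivity),
        List.foldl_append, ih (by omega)]
    simp only [List.foldl_cons, List.foldl_nil]
    rw [PySem.List.pyGet?_natCast, List.getElem?_eq_getElem hklt]
    simp only [roundsum_eq m nums[k] (hmax _ (List.getElem_mem hklt))]
    rw [List.take_add_one, List.getElem?_eq_getElem hklt]
    simp only [Option.toList_some, List.countP_append, List.countP_cons, List.countP_nil]
    simp only [decide_eq_true_eq]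
    by_cases ho : PySem.Int.mod (piCnt nums[k]) 2 ≠ 0
    · rw [if_pos ho, if_pos rfl, if_pos ho]
      push_cast
      simp only [Option.some.injEq, Prod.mk.injEq]
      exact ⟨trivial, by omega⟩
    · rw [if_neg ho, if_neg (show ¬(("Ben" : String) = "Maria") by decide), if_neg ho]
      push_cast
      simp only [Option.some.injEq, Prod.mk.injEq]
      omega

def verdict (maria ben : Int) : Option String :=
  if maria > ben then some "Maria" else if ben > maria then some "Ben" else none

theorem main (x : Int) (nums : List Int) (hne : nums ≠ []) (hlen : x ≤ (nums.length : Int)) :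
    isWinner x nums = isWinner_alt x nums := by
  obtain ⟨m, hm⟩ : ∃ m, PySem.List.max? nums (fun y => y) = some m := by
    cases h : PySem.List.max? nums (fun y => y) with
    | none => exact absurd ((PySem.List.max?_eq_none_iff _ _).mp h) hne
    | some m => exact ⟨m, rfl⟩
  have hmax : ∀ y ∈ nums, y ≤ m := PySem.List.max?_isMax hm
  rw [isWinner, hm]
  by_cases hx : x < 1
  · rw [isWinner_alt, if_pos (Or.inr hx)]
    rw [PySem.List.pyRange_one_eq_nil (by omega : x ≤ 0)]
    simp
  · have hx0 : (0 : Int) ≤ x := by omega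
    have hkx : x = ((x.toNat : Nat) : Int) := by omega
    have hkle : x.toNat ≤ nums.length := by omega
    rw [isWinner_alt, if_neg (by rintro (h | h); exacts [hne h, by omega])]
    dsimp only
    rw [PySem.List.slice_to nums hx0]
    have hrne : nums.take x.toNat ≠ [] := by
      intro h
      rcases List.take_eq_nil_iff.mp h with h' | h'
      · omega
      · exact hne h'
    obtain ⟨mx, hmx⟩ : ∃ mx, PySem.List.max? (nums.take x.toNat) (fun y => y) = some mx := by
      cases h : PySem.List.max? (nums.take x.toNat) (fun y => y) with
      | none => exact absurd ((PySem.List.max?_eq_none_iff _ _).mp h) hrne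
      | some v => exact ⟨v, rfl⟩
    rw [hmx]
    dsimp only
    -- A's score loop
    conv_lhs => rw [hkx]
    rw [scoreA_fold nums m hmax x.toNat hkle]
    dsimp only
    -- facts about the maxima
    have hmxm : mx ≤ m := hmax mx (List.mem_of_mem_take (PySem.List.max?_mem hmx))
    have hmax2 : ∀ y ∈ nums.take x.toNat, y ≤ mx := PySem.List.max?_isMax hmx
    -- B's counting loop equals A's count
    have hmaria : (nums.take x.toNat).foldl
        (fun (acc : Int) n =>
          if 2 ≤ n ∧ PySem.Int.mod
              (PySem.List.pyGetD
                ((PySem.List.pyRange 0 (max mx 1 + 1) 1).foldl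
                  (fun (st : List Int × Int) i =>
                    let c := if isPrimeB i then st.2 + 1 else st.2
                    (st.1 ++ [c], c)) ([], 0)).1 n 0) 2 = 1
          then acc + 1 else acc) 0
        = (((nums.take x.toNat).countP
            (fun nr => decide (PySem.Int.mod (piCnt nr) 2 ≠ 0)) : Nat) : Int) := by
      have hLnat : max mx 1 + 1 = (((max mx 1 + 1).toNat : Nat) : Int) := by omega
      rw [hLnat, pc_fold ((max mx 1 + 1).toNat)]
      dsimp only
      rw [PySem.List.foldl_ite_add_one
        (fun n => 2 ≤ n ∧ PySem.Int.mod
          (PySem.List.pyGetD ((PySem.List.pyRange 0 (((max mx 1 + 1).toNat : Nat) : Int) 1).map piCnt) n 0) 2 = 1)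
        (nums.take x.toNat) 0, zero_add]
      congr 1
      refine List.countP_congr ?_
      intro nr hmem
      simp only [decide_eq_true_eq]
      by_cases h2 : 2 ≤ nr
      · have hget : PySem.List.pyGetD
            ((PySem.List.pyRange 0 (((max mx 1 + 1).toNat : Nat) : Int) 1).map piCnt) nr 0 = piCnt nr := by
          refine PySem.List.pyGetD_map_pyRange_of_nonneg piCnt _ nr 0 (by omega) ?_
          have := hmax2 nr hmem
          omega
        rw [hget]
        rcases PySem.Int.mod_two_eq (piCnt nr) with h | h <;> rw [h] <;> simp [h2]
      · have hz : piCnt nr = 0 := piCnt_lt_two nr (by omega)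
        simp only [h2, false_and, false_iff]
        rw [hz]
        decide
    have hlenT : ((nums.take x.toNat).length : Int) = ((x.toNat : Nat) : Int) := by
      simp [List.length_take]
      omega
    show verdict _ _ = verdict _ _
    rw [hmaria, hlenT]

-- ===== VERDICT (by name: the statement is the Claim_ definition above) =====
theorem isWinner_spec : Claim_equal_isWinner := by
  intro x nums _ hpre
  unfold Pre_isWinner at hpre
  unfold Spec_isWinner
  exact main x nums hpre.1 hpre.2
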